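-- pv_equiv track=rewrite | github.com/francorotundo/katas_Codewars | kata_RGB_To_Hex_Conversion.py | rgb
-- ===== SOURCE A (Python) =====
-- def rgb(r, g, b):
--     hex = ["0", "1", "2", "3", "4", "5", "6", "7", "8", "9", "A", "B", "C", "D", "E", "F"]
--     color = {'r': r, 'g': g, 'b': b}
--     for key,value in color.items():
--         if value < 0:
--             color[key] = '00'
--         elif value >= 0 and value<=255:
--             x1 = value%16
--             x2 = value//16
--             color[key] = hex[x2] + hex[x1]
--         else:
--             color[key] =  'FF'
--     return color['r']+ color['g'] + color['b']
-- ===== SOURCE B (Python) =====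
-- def rgb(r, g, b):
--     def clamp(v):
--         return 0 if v < 0 else 255 if v > 255 else v
--     n = (clamp(r) * 256 + clamp(g)) * 256 + clamp(b)
--     digits = []
--     for _ in range(6):
--         n, d = divmod(n, 16)
--         digits.append(chr(48 + d if d < 10 else 55 + d))
--     return "".join(reversed(digits))
-- ===== Notes on version B (the rewrite author's own statement) =====
-- stated objective: alternative
-- what changed: Instead of A's per-channel dict with three-way branching and a hex digit table, B clamps each channel arithmetically, packs all three into a single 24-bit integer, and peels off six hex digits least-significant-first with divmod and chr-code arithmetic, reversing at the end.
import Mathlib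
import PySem

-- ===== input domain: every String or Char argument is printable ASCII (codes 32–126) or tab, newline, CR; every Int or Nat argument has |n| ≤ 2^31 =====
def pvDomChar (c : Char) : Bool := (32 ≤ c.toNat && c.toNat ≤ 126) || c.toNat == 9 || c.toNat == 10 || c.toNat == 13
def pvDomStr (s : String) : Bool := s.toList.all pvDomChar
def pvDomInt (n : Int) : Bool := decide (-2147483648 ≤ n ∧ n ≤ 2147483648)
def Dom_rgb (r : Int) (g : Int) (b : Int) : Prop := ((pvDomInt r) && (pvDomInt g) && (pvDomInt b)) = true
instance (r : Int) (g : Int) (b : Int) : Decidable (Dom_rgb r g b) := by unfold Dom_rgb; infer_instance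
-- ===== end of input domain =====

-- B drops A's per-channel branch/hex-table scheme entirely: it clamps each channel, packs the three
-- into one 24-bit integer, and extracts six hex digits back-to-front by repeated divmod with
-- arithmetic character codes; same return value (objective: alternative decomposition).

-- ===== PORT A =====
def hexDigitsA : List String := ["0","1","2","3","4","5","6","7","8","9","A","B","C","D","E","F"]

-- the body of A's loop for one dict entry (values r, g, b in insertion order)
def rgbChannelA (value : Int) : String :=
  if value < 0 then "00"
  else if 0 ≤ value ∧ value ≤ 255 then
    (PySem.List.pyGet? hexDigitsA (PySem.Int.floordiv value 16)).getD "" ++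
    (PySem.List.pyGet? hexDigitsA (PySem.Int.mod value 16)).getD ""
  else "FF"

def rgb (r : Int) (g : Int) (b : Int) : String :=
  rgbChannelA r ++ rgbChannelA g ++ rgbChannelA b

-- ===== PORT B =====
def clampB (v : Int) : Int := if v < 0 then 0 else if v > 255 then 255 else v

-- chr(48 + d if d < 10 else 55 + d); d is always in [0, 16) here
def digitCharB (d : Int) : Char :=
  if d < 10 then Char.ofNat (48 + d).toNat else Char.ofNat (55 + d).toNat

def rgb_alt (r : Int) (g : Int) (b : Int) : String :=
  let n0 := (clampB r * 256 + clampB g) * 256 + clampB b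
  let st := (List.range 6).foldl
    (fun (p : Int × List Char) _ =>
      (PySem.Int.floordiv p.1 16, p.2 ++ [digitCharB (PySem.Int.mod p.1 16)]))
    (n0, [])
  String.ofList st.2.reverse

-- ===== PRECONDITION & SPEC =====
def Spec_rgb (r : Int) (g : Int) (b : Int) (out : String) : Prop := out = rgb_alt r g b
instance (r : Int) (g : Int) (b : Int) (out : String) : Decidable (Spec_rgb r g b out) := by unfold Spec_rgb; infer_instance

-- ===== CLAIM (what is proved, stated in full; the proofs are below) =====
def Claim_equal_rgb : Prop := ∀ (r : Int) (g : Int) (b : Int), Dom_rgb r g b → Spec_rgb r g b (rgb r g b)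

-- ===== LEMMAS AND PROOFS =====

lemma clampB_bounds (v : Int) : 0 ≤ clampB v ∧ clampB v ≤ 255 := by
  unfold clampB; split_ifs <;> omega

-- A's channel string, expressed as the two digit characters of the clamped value
lemma chanA_fin : ∀ k : Fin 256, rgbChannelA ((k : Nat) : Int)
    = String.ofList [digitCharB (PySem.Int.floordiv ((k : Nat) : Int) 16),
                     digitCharB (PySem.Int.mod ((k : Nat) : Int) 16)] := by
  set_option maxRecDepth 4096 in decide

lemma chanA_eq (v : Int) : rgbChannelA v
    = String.ofList [digitCharB (PySem.Int.floordiv (clampB v) 16),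
                     digitCharB (PySem.Int.mod (clampB v) 16)] := by
  by_cases h1 : v < 0
  · have hc : clampB v = 0 := by unfold clampB; split_ifs <;> omega
    rw [hc]; unfold rgbChannelA; rw [if_pos h1]; decide
  · by_cases h2 : v ≤ 255
    · have hc : clampB v = v := by unfold clampB; split_ifs <;> omega
      rw [hc]
      have hv : v = ((v.toNat : Nat) : Int) := by omega
      have hlt : v.toNat < 256 := by omega
      rw [hv]
      exact chanA_fin ⟨v.toNat, hlt⟩
    · have hc : clampB v = 255 := by unfold clampB; split_ifs <;> omega
      rw [hc]; unfold rgbChannelA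
      rw [if_neg h1, if_neg (by omega)]; decide

-- B's foldl over range(6), unfolded: the six digit characters of n0, least significant first,
-- then reversed (pure structural reduction)
lemma alt_unfold (r g b : Int) : rgb_alt r g b =
    String.ofList
      [digitCharB (PySem.Int.mod (PySem.Int.floordiv (PySem.Int.floordiv (PySem.Int.floordiv (PySem.Int.floordiv (PySem.Int.floordiv ((clampB r * 256 + clampB g) * 256 + clampB b) 16) 16) 16) 16) 16) 16),
       digitCharB (PySem.Int.mod (PySem.Int.floordiv (PySem.Int.floordiv (PySem.Int.floordiv (PySem.Int.floordiv ((clampB r * 256 + clampB g) * 256 + clampB b) 16) 16) 16) 16) 16),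
       digitCharB (PySem.Int.mod (PySem.Int.floordiv (PySem.Int.floordiv (PySem.Int.floordiv ((clampB r * 256 + clampB g) * 256 + clampB b) 16) 16) 16) 16),
       digitCharB (PySem.Int.mod (PySem.Int.floordiv (PySem.Int.floordiv ((clampB r * 256 + clampB g) * 256 + clampB b) 16) 16) 16),
       digitCharB (PySem.Int.mod (PySem.Int.floordiv ((clampB r * 256 + clampB g) * 256 + clampB b) 16) 16),
       digitCharB (PySem.Int.mod ((clampB r * 256 + clampB g) * 256 + clampB b) 16)] := rfl

-- the six digits of the packed number are exactly the per-channel digits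
lemma digits_of_pack (a b c : Int) (ha : 0 ≤ a) (ha' : a ≤ 255) (hb : 0 ≤ b) (hb' : b ≤ 255)
    (hc : 0 ≤ c) (hc' : c ≤ 255) :
    PySem.Int.mod ((a * 256 + b) * 256 + c) 16 = PySem.Int.mod c 16 ∧
    PySem.Int.mod (PySem.Int.floordiv ((a * 256 + b) * 256 + c) 16) 16 = PySem.Int.floordiv c 16 ∧
    PySem.Int.mod (PySem.Int.floordiv (PySem.Int.floordiv ((a * 256 + b) * 256 + c) 16) 16) 16 = PySem.Int.mod b 16 ∧
    PySem.Int.mod (PySem.Int.floordiv (PySem.Int.floordiv (PySem.Int.floordiv ((a * 256 + b) * 256 + c) 16) 16) 16) 16 = PySem.Int.floordiv b 16 ∧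
    PySem.Int.mod (PySem.Int.floordiv (PySem.Int.floordiv (PySem.Int.floordiv (PySem.Int.floordiv ((a * 256 + b) * 256 + c) 16) 16) 16) 16) 16 = PySem.Int.mod a 16 ∧
    PySem.Int.mod (PySem.Int.floordiv (PySem.Int.floordiv (PySem.Int.floordiv (PySem.Int.floordiv (PySem.Int.floordiv ((a * 256 + b) * 256 + c) 16) 16) 16) 16) 16) 16 = PySem.Int.floordiv a 16 := by
  simp only [PySem.Int.floordiv_eq_ediv_of_pos (show (0:Int) < 16 by omega),
             PySem.Int.mod_eq_emod_of_pos (show (0:Int) < 16 by omega)]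
  omega

-- ===== VERDICT (by name: the statement is the Claim_ definition above) =====
theorem rgb_spec : Claim_equal_rgb := by
  intro r g b _
  unfold Spec_rgb rgb
  rw [chanA_eq r, chanA_eq g, chanA_eq b, alt_unfold,
      ← String.ofList_append, ← String.ofList_append]
  obtain ⟨hr1, hr2⟩ := clampB_bounds r
  obtain ⟨hg1, hg2⟩ := clampB_bounds g
  obtain ⟨hb1, hb2⟩ := clampB_bounds b
  obtain ⟨e0, e1, e2, e3, e4, e5⟩ :=
    digits_of_pack (clampB r) (clampB g) (clampB b) hr1 hr2 hg1 hg2 hb1 hb2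
  rw [e0, e1, e2, e3, e4, e5]
  rfl
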